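-- pv_equiv track=rewrite | github.com/Maegner/IA17-18 | bot.py | isImpossible
-- ===== SOURCE A (Python) =====
-- import copy
--
-- def isImpossible(matrix):
--
--     groups = board_find_groups(matrix)
--
--     if len(groups) == 0:
--         return False
--
--     for group in groups:
--         if len(group) != 1:
--             return False
--     return True
--
-- def get_neighbours(pos,matrix,element,result):
--
--     # verfies if the element to the top of the refered position is equal to the element
--     if pos[0]-1 >= 0 :
--         if element == matrix[pos[0]-1][pos[1]]:
--
--             nextPos = (pos[0]-1,pos[1])
--             matrix[pos[0]-1][pos[1]] = -1
--             result.append((pos[0]-1,pos[1]))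
--             get_neighbours(nextPos,matrix,element,result)
--
--     # verfies if the element to the bottom of the refered position is equal to the element
--     if len(matrix) > pos[0]+1:
--         if element == matrix[pos[0]+1][pos[1]]:
--
--             nextPos = (pos[0]+1,pos[1])
--             matrix[pos[0]+1][pos[1]] = -1
--             result.append((pos[0]+1,pos[1]))
--             get_neighbours(nextPos,matrix,element,result)
--
--     # verfies if the element to the right of the refered position is equal to the element
--     if len(matrix[pos[0]]) > pos[1]+1:
--         if element == matrix[pos[0]][pos[1]+1]:
--
--             nextPos = (pos[0],pos[1]+1)
--             matrix[pos[0]][pos[1]+1] = -1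
--             result.append((pos[0],pos[1]+1))
--             get_neighbours(nextPos,matrix,element,result)
--
--
--     # verfies if the element to the left of the refered position is equal to the element
--     if  pos[1]-1 >= 0:
--         if element == matrix[pos[0]][pos[1]-1]:
--             nextPos = (pos[0],pos[1]-1)
--             matrix[pos[0]][pos[1]-1] = -1
--             result.append((pos[0],pos[1]-1))
--             get_neighbours(nextPos,matrix,element,result)
--     return result
--
-- def board_find_groups(matrix):
--     matrixCopy = copy.deepcopy(matrix)
--     result = []
--     l = 0
--     col = 0
--     for linha in matrixCopy:
--         for element in linha:
--             if element == -1 or element == 0: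
--                 col+=1
--                 continue
--             matrixCopy[l][col] = -1
--             neighbours = get_neighbours((l,col),matrixCopy,element,[(l,col)])
--             if(len(neighbours) >= 1):
--                 result.append(neighbours)
--             col+=1
--         l+=1
--         col = 0
--     return result
-- ===== SOURCE B (Python) =====
-- def isImpossible(matrix):
--     # Single pass over the board: the answer is "some non-empty (non 0/-1) cell
--     # exists and no two orthogonally adjacent cells hold the same such value",
--     # so we only need to look at each cell's right and down neighbour.
--     n = len(matrix)
--     has_tile = any(
--         matrix[i][j] != 0 and matrix[i][j] != -1
--         for i in range(n) for j in range(len(matrix[i])))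
--     has_pair = any(
--         matrix[i][j] != 0 and matrix[i][j] != -1 and (
--             (j + 1 < len(matrix[i]) and matrix[i][j + 1] == matrix[i][j]) or
--             (i + 1 < n and j < len(matrix[i + 1]) and matrix[i + 1][j] == matrix[i][j]))
--         for i in range(n) for j in range(len(matrix[i])))
--     return has_tile and not has_pair
-- ===== Notes on version B (the rewrite author's own statement) =====
-- stated objective: simpler
-- what changed: Replaces A's deepcopy + recursive flood-fill group extraction with a single index-based pass that checks each non-empty cell's right and down neighbour for an equal value (all groups are singletons iff no such adjacent pair exists).
import Mathlib
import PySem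

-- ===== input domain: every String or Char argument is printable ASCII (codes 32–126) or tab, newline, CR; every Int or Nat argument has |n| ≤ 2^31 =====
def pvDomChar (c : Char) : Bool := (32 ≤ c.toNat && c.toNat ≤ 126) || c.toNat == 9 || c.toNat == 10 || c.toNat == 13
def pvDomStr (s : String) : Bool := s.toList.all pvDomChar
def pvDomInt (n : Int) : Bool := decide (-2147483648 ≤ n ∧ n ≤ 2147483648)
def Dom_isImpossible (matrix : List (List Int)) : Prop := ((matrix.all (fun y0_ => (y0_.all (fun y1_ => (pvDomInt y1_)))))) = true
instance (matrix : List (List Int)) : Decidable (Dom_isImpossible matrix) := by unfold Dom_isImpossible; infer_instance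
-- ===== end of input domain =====

-- B replaces A's deepcopy + recursive flood-fill group extraction by one simpler index
-- pass that checks each non-empty cell's right/down neighbour for an equal value.

-- ===== PORT A =====
-- shared accessors (Python's matrix[i][j] reads / in-place writes; every read A
-- performs is in range on inputs admitted by Pre_, so the getD defaults are never hit there)
def rlen (m : List (List Int)) (i : Nat) : Nat := (m.getD i []).length
def cellv (m : List (List Int)) (i j : Nat) : Int := (m.getD i []).getD j (-2)
def setc (m : List (List Int)) (i j : Nat) (v : Int) : List (List Int) :=
  m.set i ((m.getD i []).set j v)

-- one neighbour branch of get_neighbours: if the (bounds ∧ equality) test passes,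
-- mark the neighbour -1, append it to the result and recurse (g = the recursive call)
def gnStep (g : List (List Int) → Int → List (Nat × Nat) → Nat → Nat →
      List (List Int) × List (Nat × Nat))
    (el : Int) (s : List (List Int) × List (Nat × Nat)) (c : Prop) [Decidable c]
    (i' j' : Nat) : List (List Int) × List (Nat × Nat) :=
  if c then g (setc s.1 i' j' (-1)) el (s.2 ++ [(i', j')]) i' j' else s

-- get_neighbours: Python mutates matrix and result in place; the port threads
-- (matrix, result) through the same four neighbour checks in the same order.
-- 'fuel' is only a totality device (it exceeds the recursion depth on every admitted input).
def gn : Nat → List (List Int) → Int → List (Nat × Nat) → Nat → Nat →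
    List (List Int) × List (Nat × Nat)
  | 0, m, _, res, _, _ => (m, res)
  | fuel+1, m, el, res, i, j =>
    let s1 := gnStep (gn fuel) el (m, res) (1 ≤ i ∧ el = cellv m (i-1) j) (i-1) j
    let s2 := gnStep (gn fuel) el s1 (i+1 < s1.1.length ∧ el = cellv s1.1 (i+1) j) (i+1) j
    let s3 := gnStep (gn fuel) el s2 (j+1 < rlen s2.1 i ∧ el = cellv s2.1 i (j+1)) i (j+1)
    gnStep (gn fuel) el s3 (1 ≤ j ∧ el = cellv s3.1 i (j-1)) i (j-1)

def fuelOf (m : List (List Int)) : Nat := (m.map List.length).sum + 1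

-- board_find_groups' nested scan: inner loop over the columns of row l …
def bfgCols (l : Nat) : List (List Int) → Nat → Nat → List (List (Nat × Nat)) →
    List (List Int) × List (List (Nat × Nat))
  | m, _, 0, res => (m, res)
  | m, c, rem+1, res =>
    let el := cellv m l c
    if el = -1 ∨ el = 0 then bfgCols l m (c+1) rem res
    else
      let m1 := setc m l c (-1)
      let p := gn (fuelOf m1) m1 el [(l, c)] l c
      bfgCols l p.1 (c+1) rem (if 1 ≤ p.2.length then res ++ [p.2] else res)

-- … and outer loop over the rows
def bfgRows : List (List Int) → Nat → Nat → List (List (Nat × Nat)) →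
    List (List Int) × List (List (Nat × Nat))
  | m, _, 0, res => (m, res)
  | m, l, rem+1, res =>
    let p := bfgCols l m 0 (rlen m l) res
    bfgRows p.1 (l+1) rem p.2

def board_find_groups (matrix : List (List Int)) : List (List (Nat × Nat)) :=
  (bfgRows matrix 0 matrix.length []).2

def isImpossible (matrix : List (List Int)) : Bool :=
  let groups := board_find_groups matrix
  if groups.length = 0 then false
  else groups.all (fun g => g.length = 1)   -- the for-loop's early "return False" ≡ all

-- ===== PORT B =====
def isImpossible_alt (matrix : List (List Int)) : Bool :=
  let n := matrix.length
  let hasTile := (List.range n).any (fun i =>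
    (List.range (matrix.getD i []).length).any (fun j =>
      ((matrix.getD i []).getD j 0 != 0) && ((matrix.getD i []).getD j 0 != -1)))
  let hasPair := (List.range n).any (fun i =>
    (List.range (matrix.getD i []).length).any (fun j =>
      (((matrix.getD i []).getD j 0 != 0) && ((matrix.getD i []).getD j 0 != -1)) &&
      ((decide (j+1 < (matrix.getD i []).length) &&
          ((matrix.getD i []).getD (j+1) 0 == (matrix.getD i []).getD j 0)) ||
       (decide (i+1 < n) && decide (j < (matrix.getD (i+1) []).length) &&
          ((matrix.getD (i+1) []).getD j 0 == (matrix.getD i []).getD j 0)))))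
  hasTile && !hasPair

-- ===== PRECONDITION & SPEC =====
-- Pre_ excludes exactly the inputs on which A raises: ragged boards where some
-- non-0/-1 cell's column index is out of range for an adjacent row, so A's neighbour
-- probe matrix[i±1][j] raises IndexError; every other board (rectangular or ragged)
-- is admitted.
def Pre_isImpossible (matrix : List (List Int)) : Prop :=
  ¬ ∃ i < matrix.length, ∃ j < rlen matrix i,
    cellv matrix i j ≠ 0 ∧ cellv matrix i j ≠ -1 ∧
    ((1 ≤ i ∧ rlen matrix (i-1) ≤ j) ∨ (i+1 < matrix.length ∧ rlen matrix (i+1) ≤ j))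
instance (matrix : List (List Int)) : Decidable (Pre_isImpossible matrix) := by
  unfold Pre_isImpossible; infer_instance

def pvWitness_isImpossible : List (List Int) := [[1, 2], [0, 3]]

def Spec_isImpossible (matrix : List (List Int)) (out : Bool) : Prop := out = isImpossible_alt matrix
instance (matrix : List (List Int)) (out : Bool) : Decidable (Spec_isImpossible matrix out) := by unfold Spec_isImpossible; infer_instance

-- ===== CLAIM (what is proved, stated in full; the proofs are below) =====
def Claim_equal_isImpossible : Prop := ∀ (matrix : List (List Int)), Dom_isImpossible matrix → Pre_isImpossible matrix → Spec_isImpossible matrix (isImpossible matrix)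

-- ===== LEMMAS AND PROOFS =====

-- semantic predicates about the ORIGINAL board
def NZ (M : List (List Int)) (i j : Nat) : Prop := cellv M i j ≠ 0 ∧ cellv M i j ≠ -1
def IsBad (M : List (List Int)) (i j : Nat) : Prop :=
  NZ M i j ∧
  ((j+1 < rlen M i ∧ cellv M i (j+1) = cellv M i j) ∨
   (i+1 < M.length ∧ j < rlen M (i+1) ∧ cellv M (i+1) j = cellv M i j))
def HasCell (M : List (List Int)) : Prop := ∃ i < M.length, ∃ j < rlen M i, NZ M i j
def Bad (M : List (List Int)) : Prop := ∃ i < M.length, ∃ j < rlen M i, IsBad M i j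

-- scan order on cells, and "before (l,c)" versions of the predicates
def Before (i j l c : Nat) : Prop := i < l ∨ (i = l ∧ j < c)
def BadBefore (M : List (List Int)) (l c : Nat) : Prop :=
  ∃ i j, Before i j l c ∧ i < M.length ∧ j < rlen M i ∧ IsBad M i j
def HasBefore (M : List (List Int)) (l c : Nat) : Prop :=
  ∃ i j, Before i j l c ∧ i < M.length ∧ j < rlen M i ∧ NZ M i j

-- loop invariant pieces
def Shape (M m : List (List Int)) : Prop := m.length = M.length ∧ ∀ i, rlen m i = rlen M i
def MaskPt (M m : List (List Int)) (l c : Nat) : Prop :=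
  ∀ i j, i < M.length → j < rlen M i →
    (Before i j l c ∧ NZ M i j → cellv m i j = -1) ∧
    (¬ (Before i j l c ∧ NZ M i j) → cellv m i j = cellv M i j)
def GoodRes (M : List (List Int)) (l c : Nat) (res : List (List (Nat × Nat))) : Prop :=
  (∀ g ∈ res, g.length = 1) ∧ (res ≠ [] ↔ HasBefore M l c)
def InvA (M : List (List Int)) (l c : Nat)
    (s : List (List Int) × List (List (Nat × Nat))) : Prop :=
  Shape M s.1 ∧
  (BadBefore M l c → ∃ g ∈ s.2, 2 ≤ g.length) ∧
  (¬ BadBefore M l c → MaskPt M s.1 l c ∧ GoodRes M l c s.2)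

-- unpacking Pre_ at a cell
theorem pre_ranges (M : List (List Int)) (hPre : Pre_isImpossible M) (i j : Nat)
    (hi : i < M.length) (hj : j < rlen M i) (h0 : cellv M i j ≠ 0) (h1 : cellv M i j ≠ -1) :
    (1 ≤ i → j < rlen M (i-1)) ∧ (i+1 < M.length → j < rlen M (i+1)) := by
  unfold Pre_isImpossible at hPre
  push Not at hPre
  exact hPre i hi j hj h0 h1

-- basic facts about setc
theorem length_setc (m : List (List Int)) (i j : Nat) (v : Int) :
    (setc m i j v).length = m.length := by simp [setc]

theorem getD_set_row (m : List (List Int)) (i i' : Nat) (r : List Int) :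
    (m.set i r).getD i' [] = if i = i' ∧ i < m.length then r else m.getD i' [] := by
  rcases Nat.lt_or_ge i' m.length with h | h
  · rw [List.getD_eq_getElem _ _ (by simpa using h), List.getD_eq_getElem _ _ h,
      List.getElem_set]
    by_cases hii : i = i'
    · subst hii; simp [h]
    · simp [hii]
  · rw [List.getD_eq_default _ _ (by simpa using h), List.getD_eq_default _ _ h]
    have : ¬ (i = i' ∧ i < m.length) := by rintro ⟨rfl, hlt⟩; omega
    simp [this]

theorem rlen_setc (m : List (List Int)) (i j : Nat) (v : Int) (i' : Nat) :
    rlen (setc m i j v) i' = rlen m i' := by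
  unfold rlen setc
  rw [getD_set_row]
  split_ifs with h
  · obtain ⟨rfl, _⟩ := h; simp
  · rfl

theorem cellv_setc_same (m : List (List Int)) (i j : Nat) (v : Int)
    (hi : i < m.length) (hj : j < rlen m i) :
    cellv (setc m i j v) i j = v := by
  unfold cellv setc
  rw [getD_set_row]
  simp only [hi, and_true]
  rw [List.getD_eq_getElem _ _ (by simpa [rlen] using hj)]
  simp

theorem cellv_setc_other (m : List (List Int)) (i j : Nat) (v : Int) (i' j' : Nat)
    (h : i ≠ i' ∨ j ≠ j') :
    cellv (setc m i j v) i' j' = cellv m i' j' := by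
  unfold cellv setc
  rw [getD_set_row]
  split_ifs with hc
  · obtain ⟨rfl, hlt⟩ := hc
    have hj : j ≠ j' := by
      rcases h with h | h
      · exact absurd rfl h
      · exact h
    rcases Nat.lt_or_ge j' (m.getD i []).length with hj' | hj'
    · rw [List.getD_eq_getElem _ _ (by simpa using hj'), List.getD_eq_getElem _ _ hj']
      simp [hj]
    · rw [List.getD_eq_default _ _ (by simpa using hj'), List.getD_eq_default _ _ hj']
  · rfl

-- "the state is only extended/reshaped-invariantly": result appended, shape kept
def PP (a b : List (List Int) × List (Nat × Nat)) : Prop :=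
  (∃ t, b.2 = a.2 ++ t) ∧ b.1.length = a.1.length ∧ ∀ k, rlen b.1 k = rlen a.1 k

theorem PP_refl (a : List (List Int) × List (Nat × Nat)) : PP a a :=
  ⟨⟨[], by simp⟩, rfl, fun _ => rfl⟩

theorem PP_trans {a b c : List (List Int) × List (Nat × Nat)} (h1 : PP a b) (h2 : PP b c) :
    PP a c := by
  obtain ⟨⟨t1, ht1⟩, hl1, hr1⟩ := h1
  obtain ⟨⟨t2, ht2⟩, hl2, hr2⟩ := h2
  exact ⟨⟨t1 ++ t2, by rw [ht2, ht1, List.append_assoc]⟩, hl2.trans hl1,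
    fun k => (hr2 k).trans (hr1 k)⟩

theorem gnStep_PP (g : List (List Int) → Int → List (Nat × Nat) → Nat → Nat →
      List (List Int) × List (Nat × Nat)) (el : Int)
    (hg : ∀ m res i j, PP (m, res) (g m el res i j))
    (s : List (List Int) × List (Nat × Nat)) (c : Prop) [Decidable c] (i' j' : Nat) :
    PP s (gnStep g el s c i' j') := by
  unfold gnStep
  by_cases hc : c
  · rw [if_pos hc]
    obtain ⟨⟨t, ht⟩, hl, hr⟩ := hg (setc s.1 i' j' (-1)) (s.2 ++ [(i', j')]) i' j'
    exact ⟨⟨(i', j') :: t, by simp [ht]⟩, by rw [hl, length_setc],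
      fun k => by rw [hr k, rlen_setc]⟩
  · rw [if_neg hc]; exact PP_refl s

theorem gn_PP : ∀ (f : Nat) (m : List (List Int)) (el : Int) (res : List (Nat × Nat))
    (i j : Nat), PP (m, res) (gn f m el res i j) := by
  intro f
  induction f with
  | zero => intro m el res i j; exact PP_refl _
  | succ f ih =>
    intro m el res i j
    simp only [gn]
    exact PP_trans (PP_trans (PP_trans
      (gnStep_PP (gn f) el (fun m' r' i' j' => ih m' el r' i' j') (m, res) _ _ _)
      (gnStep_PP (gn f) el (fun m' r' i' j' => ih m' el r' i' j') _ _ _ _))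
      (gnStep_PP (gn f) el (fun m' r' i' j' => ih m' el r' i' j') _ _ _ _))
      (gnStep_PP (gn f) el (fun m' r' i' j' => ih m' el r' i' j') _ _ _ _)

theorem gnStep_neg (g : List (List Int) → Int → List (Nat × Nat) → Nat → Nat →
      List (List Int) × List (Nat × Nat)) (el : Int)
    (s : List (List Int) × List (Nat × Nat)) (c : Prop) [Decidable c] (i' j' : Nat)
    (hc : ¬ c) : gnStep g el s c i' j' = s := by
  unfold gnStep; rw [if_neg hc]

-- if no neighbour matches, get_neighbours returns its arguments unchanged
theorem gn_stuck (f : Nat) (m : List (List Int)) (el : Int) (res : List (Nat × Nat))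
    (i j : Nat)
    (h1 : ¬(1 ≤ i ∧ el = cellv m (i-1) j))
    (h2 : ¬(i+1 < m.length ∧ el = cellv m (i+1) j))
    (h3 : ¬(j+1 < rlen m i ∧ el = cellv m i (j+1)))
    (h4 : ¬(1 ≤ j ∧ el = cellv m i (j-1))) :
    gn f m el res i j = (m, res) := by
  cases f with
  | zero => rfl
  | succ f =>
    simp only [gn]
    rw [gnStep_neg _ _ _ _ _ _ h1, gnStep_neg _ _ _ _ _ _ h2,
      gnStep_neg _ _ _ _ _ _ h3, gnStep_neg _ _ _ _ _ _ h4]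

-- if the down or right neighbour matches (and up does not), the flood returns ≥ 2 cells
theorem gnStep_pos (g : List (List Int) → Int → List (Nat × Nat) → Nat → Nat →
      List (List Int) × List (Nat × Nat)) (el : Int)
    (s : List (List Int) × List (Nat × Nat)) (c : Prop) [Decidable c] (i' j' : Nat)
    (hc : c) : gnStep g el s c i' j' = g (setc s.1 i' j' (-1)) el (s.2 ++ [(i', j')]) i' j' := by
  unfold gnStep; rw [if_pos hc]

theorem gn_two (f : Nat) (m : List (List Int)) (el : Int) (res : List (Nat × Nat))
    (i j : Nat) (hres : 1 ≤ res.length)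
    (h1 : ¬(1 ≤ i ∧ el = cellv m (i-1) j))
    (hdr : (i+1 < m.length ∧ el = cellv m (i+1) j) ∨
      (¬(i+1 < m.length ∧ el = cellv m (i+1) j) ∧ (j+1 < rlen m i ∧ el = cellv m i (j+1)))) :
    2 ≤ (gn (f+1) m el res i j).2.length := by
  have hgn : ∀ m' r' i' j', PP (m', r') (gn f m' el r' i' j') :=
    fun m' r' i' j' => gn_PP f m' el r' i' j'
  simp only [gn]
  rw [gnStep_neg _ _ _ _ _ _ h1]
  rcases hdr with hd | ⟨hnd, hr⟩
  · rw [gnStep_pos _ _ (m, res) _ _ _ hd]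
    have p2 := gn_PP f (setc m (i+1) j (-1)) el (res ++ [(i+1, j)]) (i+1) j
    generalize hS : gn f (setc m (i+1) j (-1)) el (res ++ [(i+1, j)]) (i+1) j = s2 at p2 ⊢
    have p3 := gnStep_PP (gn f) el hgn s2 (j+1 < rlen s2.1 i ∧ el = cellv s2.1 i (j+1)) i (j+1)
    generalize hT : gnStep (gn f) el s2 (j+1 < rlen s2.1 i ∧ el = cellv s2.1 i (j+1)) i (j+1) = s3 at p3 ⊢
    have p4 := gnStep_PP (gn f) el hgn s3 (1 ≤ j ∧ el = cellv s3.1 i (j-1)) i (j-1)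
    obtain ⟨⟨t2, ht2⟩, -, -⟩ := p2
    obtain ⟨⟨t3, ht3⟩, -, -⟩ := p3
    obtain ⟨⟨t4, ht4⟩, -, -⟩ := p4
    rw [ht4, ht3, ht2]
    simp
    omega
  · rw [gnStep_neg _ _ (m, res) _ _ _ hnd]
    rw [gnStep_pos _ _ (m, res) _ _ _ hr]
    have p3 := gn_PP f (setc m i (j+1) (-1)) el (res ++ [(i, j+1)]) i (j+1)
    generalize hS : gn f (setc m i (j+1) (-1)) el (res ++ [(i, j+1)]) i (j+1) = s3 at p3 ⊢
    have p4 := gnStep_PP (gn f) el hgn s3 (1 ≤ j ∧ el = cellv s3.1 i (j-1)) i (j-1)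
    obtain ⟨⟨t3, ht3⟩, -, -⟩ := p3
    obtain ⟨⟨t4, ht4⟩, -, -⟩ := p4
    rw [ht4, ht3]
    simp
    omega

-- scan-order bookkeeping
theorem before_succ (i j l c : Nat) : Before i j l (c+1) ↔ Before i j l c ∨ (i = l ∧ j = c) := by
  unfold Before; omega

theorem before_self (l c : Nat) : ¬ Before l c l c := by unfold Before; omega

-- a masked (already scanned) cell can never equal a non-0/-1 element
theorem masked_neq (M m : List (List Int)) (l c : Nat) (hMask : MaskPt M m l c)
    (a b : Nat) (ha : a < M.length) (hb : b < rlen M a) (hbef : Before a b l c)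
    (el : Int) (h0 : el ≠ 0) (h1 : el ≠ -1) : cellv m a b ≠ el := by
  obtain ⟨hm1, hm2⟩ := hMask a b ha hb
  by_cases hnz : NZ M a b
  · rw [hm1 ⟨hbef, hnz⟩]; exact fun h => h1 h.symm
  · rw [hm2 (fun hx => hnz hx.2)]
    have hv : cellv M a b = 0 ∨ cellv M a b = -1 := by
      by_contra hx; push Not at hx; exact hnz ⟨hx.1, hx.2⟩
    rcases hv with hv | hv <;> rw [hv]
    · exact fun h => h0 h.symm
    · exact fun h => h1 h.symm

-- a not-yet-scanned cell still holds its original value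
theorem unmasked_eq (M m : List (List Int)) (l c : Nat) (hMask : MaskPt M m l c)
    (a b : Nat) (ha : a < M.length) (hb : b < rlen M a) (hnbef : ¬ Before a b l c) :
    cellv m a b = cellv M a b :=
  (hMask a b ha hb).2 (fun hx => hnbef hx.1)

-- inner loop invariant
set_option maxHeartbeats 1000000 in
theorem bfgCols_inv (M : List (List Int)) (hPre : Pre_isImpossible M) (l : Nat)
    (hl : l < M.length) : ∀ rem c m res, c + rem = rlen M l → InvA M l c (m, res) →
    InvA M l (rlen M l) (bfgCols l m c rem res) := by
  intro rem
  induction rem with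
  | zero =>
    intro c m res hsum hInv
    have hc : c = rlen M l := by omega
    subst hc
    exact hInv
  | succ rem ih =>
    intro c m res hsum hInv
    have hc : c < rlen M l := by omega
    obtain ⟨hShape, hBadCase, hGoodCase⟩ := hInv
    simp only [bfgCols]
    by_cases hB : BadBefore M l c
    · -- a big group has already been found: everything later only appends
      obtain ⟨g, hg, hg2⟩ := hBadCase hB
      have hBB : BadBefore M l (c+1) := by
        obtain ⟨a, b, hab, h2, h3, h4⟩ := hB
        exact ⟨a, b, (before_succ a b l c).mpr (Or.inl hab), h2, h3, h4⟩
      by_cases hskip : cellv m l c = -1 ∨ cellv m l c = 0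
      · rw [if_pos hskip]
        exact ih (c+1) m res (by omega) ⟨hShape, fun _ => ⟨g, hg, hg2⟩, fun hn => absurd hBB hn⟩
      · rw [if_neg hskip]
        obtain ⟨⟨t, ht⟩, hlen, hrl⟩ :=
          gn_PP (fuelOf (setc m l c (-1))) (setc m l c (-1)) (cellv m l c) [(l, c)] l c
        refine ih (c+1) _ _ (by omega) ⟨⟨?_, ?_⟩, fun _ => ⟨g, ?_, hg2⟩, fun hn => absurd hBB hn⟩
        · rw [hlen, length_setc]; exact hShape.1
        · intro k; rw [hrl k, rlen_setc]; exact hShape.2 k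
        · split_ifs with hlen1
          · exact List.mem_append_left _ hg
          · exact hg
    · -- no big group yet: the board is the masked original
      obtain ⟨hMask, hGood⟩ := hGoodCase hB
      have hcell : cellv m l c = cellv M l c :=
        unmasked_eq M m l c hMask l c hl hc (before_self l c)
      by_cases hskip : cellv m l c = -1 ∨ cellv m l c = 0
      · -- skip branch: the cell is 0 or -1
        rw [if_pos hskip]
        rw [hcell] at hskip
        have hNZf : ¬ NZ M l c := by
          unfold NZ; rcases hskip with h | h <;> simp [h]
        have hBB1 : ¬ BadBefore M l (c+1) := by
          rintro ⟨a, b, hab, h2, h3, h4⟩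
          rcases (before_succ a b l c).mp hab with h | ⟨rfl, rfl⟩
          · exact hB ⟨a, b, h, h2, h3, h4⟩
          · exact hNZf h4.1
        have hHs : HasBefore M l (c+1) ↔ HasBefore M l c := by
          constructor
          · rintro ⟨a, b, hab, h2, h3, h4⟩
            rcases (before_succ a b l c).mp hab with h | ⟨rfl, rfl⟩
            · exact ⟨a, b, h, h2, h3, h4⟩
            · exact absurd h4 hNZf
          · rintro ⟨a, b, hab, h2, h3, h4⟩
            exact ⟨a, b, (before_succ a b l c).mpr (Or.inl hab), h2, h3, h4⟩
        refine ih (c+1) m res (by omega) ⟨hShape, fun h => absurd h hBB1, fun _ => ⟨?_, hGood.1, hGood.2.trans hHs.symm⟩⟩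
        intro a b ha hb
        obtain ⟨hm1, hm2⟩ := hMask a b ha hb
        constructor
        · rintro ⟨hbef, hnz⟩
          rcases (before_succ a b l c).mp hbef with h | ⟨rfl, rfl⟩
          · exact hm1 ⟨h, hnz⟩
          · exact absurd hnz hNZf
        · intro hn
          exact hm2 (fun ⟨hbef, hnz⟩ => hn ⟨(before_succ a b l c).mpr (Or.inl hbef), hnz⟩)
      · -- flood branch: the cell is a tile
        rw [if_neg hskip]
        rw [hcell] at hskip
        have hNZ : NZ M l c := ⟨fun h => hskip (Or.inr h), fun h => hskip (Or.inl h)⟩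
        have hmlen : m.length = M.length := hShape.1
        have hmrl : ∀ k, rlen m k = rlen M k := hShape.2
        have hup : ¬(1 ≤ l ∧ cellv m l c = cellv (setc m l c (-1)) (l-1) c) := by
          rintro ⟨hl1, heq⟩
          have hrange := (pre_ranges M hPre l c hl hc hNZ.1 hNZ.2).1 hl1
          rw [cellv_setc_other m l c (-1) (l-1) c (Or.inl (by omega))] at heq
          rw [hcell] at heq
          exact masked_neq M m l c hMask (l-1) c (by omega) hrange (Or.inl (by omega))
            (cellv M l c) hNZ.1 hNZ.2 heq.symm
        -- the down/right neighbours still hold original values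
        have hdownv : l+1 < M.length → c < rlen M (l+1) →
            cellv (setc m l c (-1)) (l+1) c = cellv M (l+1) c := by
          intro h1 h2
          rw [cellv_setc_other m l c (-1) (l+1) c (Or.inl (by omega))]
          exact unmasked_eq M m l c hMask (l+1) c h1 h2 (by unfold Before; omega)
        have hrightv : c+1 < rlen M l →
            cellv (setc m l c (-1)) l (c+1) = cellv M l (c+1) := by
          intro h1
          rw [cellv_setc_other m l c (-1) l (c+1) (Or.inr (by omega))]
          exact unmasked_eq M m l c hMask l (c+1) hl h1 (by unfold Before; omega)
        by_cases hIB : IsBad M l c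
        · -- first bad cell in scan order: the flood returns ≥ 2 cells
          have hBB : BadBefore M l (c+1) :=
            ⟨l, c, (before_succ l c l c).mpr (Or.inr ⟨rfl, rfl⟩), hl, hc, hIB⟩
          have hdr : (l+1 < (setc m l c (-1)).length ∧
                cellv m l c = cellv (setc m l c (-1)) (l+1) c) ∨
              (¬(l+1 < (setc m l c (-1)).length ∧
                cellv m l c = cellv (setc m l c (-1)) (l+1) c) ∧
               (c+1 < rlen (setc m l c (-1)) l ∧
                cellv m l c = cellv (setc m l c (-1)) l (c+1))) := by
            by_cases hdc : l+1 < (setc m l c (-1)).length ∧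
                cellv m l c = cellv (setc m l c (-1)) (l+1) c
            · exact Or.inl hdc
            · refine Or.inr ⟨hdc, ?_⟩
              rcases hIB.2 with ⟨hr1, hr2⟩ | ⟨hd1, hd2, hd3⟩
              · constructor
                · rw [rlen_setc, hmrl l]; exact hr1
                · rw [hrightv hr1, hcell]; exact hr2.symm
              · exfalso
                apply hdc
                constructor
                · rw [length_setc, hmlen]; exact hd1
                · rw [hdownv hd1 hd2, hcell]; exact hd3.symm
          have h2len : 2 ≤ (gn (fuelOf (setc m l c (-1))) (setc m l c (-1))
              (cellv m l c) [(l, c)] l c).2.length := by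
            exact gn_two ((setc m l c (-1)).map List.length).sum (setc m l c (-1))
              (cellv m l c) [(l, c)] l c (by simp) hup hdr
          obtain ⟨⟨t, ht⟩, hlen, hrl⟩ :=
            gn_PP (fuelOf (setc m l c (-1))) (setc m l c (-1)) (cellv m l c) [(l, c)] l c
          rw [if_pos (by omega)]
          refine ih (c+1) _ _ (by omega)
            ⟨⟨?_, ?_⟩, fun _ => ⟨_, List.mem_append_right _ (List.mem_singleton.mpr rfl), h2len⟩,
              fun hn => absurd hBB hn⟩
          · rw [hlen, length_setc]; exact hmlen
          · intro k; rw [hrl k, rlen_setc]; exact hmrl k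
        · -- lone tile: the flood finds nothing, the group is the singleton [(l,c)]
          have hBB1 : ¬ BadBefore M l (c+1) := by
            rintro ⟨a, b, hab, h2, h3, h4⟩
            rcases (before_succ a b l c).mp hab with h | ⟨rfl, rfl⟩
            · exact hB ⟨a, b, h, h2, h3, h4⟩
            · exact hIB h4
          have hdown : ¬(l+1 < (setc m l c (-1)).length ∧
              cellv m l c = cellv (setc m l c (-1)) (l+1) c) := by
            rintro ⟨h1', heq⟩
            rw [length_setc, hmlen] at h1'
            have hrange := (pre_ranges M hPre l c hl hc hNZ.1 hNZ.2).2 h1'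
            rw [hdownv h1' hrange, hcell] at heq
            exact hIB ⟨hNZ, Or.inr ⟨h1', hrange, heq.symm⟩⟩
          have hright : ¬(c+1 < rlen (setc m l c (-1)) l ∧
              cellv m l c = cellv (setc m l c (-1)) l (c+1)) := by
            rintro ⟨h1', heq⟩
            rw [rlen_setc, hmrl l] at h1'
            rw [hrightv h1', hcell] at heq
            exact hIB ⟨hNZ, Or.inl ⟨h1', heq.symm⟩⟩
          have hleft : ¬(1 ≤ c ∧ cellv m l c = cellv (setc m l c (-1)) l (c-1)) := by
            rintro ⟨hc1, heq⟩
            rw [cellv_setc_other m l c (-1) l (c-1) (Or.inr (by omega))] at heq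
            rw [hcell] at heq
            exact masked_neq M m l c hMask l (c-1) hl (by omega) (Or.inr ⟨rfl, by omega⟩)
              (cellv M l c) hNZ.1 hNZ.2 heq.symm
          rw [gn_stuck (fuelOf (setc m l c (-1))) (setc m l c (-1)) (cellv m l c) [(l, c)]
            l c hup hdown hright hleft]
          rw [if_pos (by simp)]
          refine ih (c+1) _ _ (by omega) ⟨⟨?_, ?_⟩, fun h => absurd h hBB1, fun _ => ⟨?_, ?_, ?_⟩⟩
          · rw [length_setc]; exact hmlen
          · intro k; rw [rlen_setc]; exact hmrl k
          · -- MaskPt advance across the newly scanned tile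
            intro a b ha hb
            by_cases hab : a = l ∧ b = c
            · obtain ⟨rfl, rfl⟩ := hab
              constructor
              · intro _
                exact cellv_setc_same m a b (-1) (by omega) (by rw [hmrl a]; exact hb)
              · intro hn
                exact absurd ⟨(before_succ a b a b).mpr (Or.inr ⟨rfl, rfl⟩), hNZ⟩ hn
            · have hne : a ≠ l ∨ b ≠ c := by
                rcases Decidable.em (a = l) with h | h
                · exact Or.inr (fun hb' => hab ⟨h, hb'⟩)
                · exact Or.inl h
              have heq : cellv (setc m l c (-1)) a b = cellv m a b :=
                cellv_setc_other m l c (-1) a b (hne.imp Ne.symm Ne.symm)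
              obtain ⟨hm1, hm2⟩ := hMask a b ha hb
              constructor
              · rintro ⟨hbef, hnz⟩
                rcases (before_succ a b l c).mp hbef with h | ⟨rfl, rfl⟩
                · rw [heq]; exact hm1 ⟨h, hnz⟩
                · exact absurd ⟨rfl, rfl⟩ hab
              · intro hn
                rw [heq]
                exact hm2 (fun ⟨hbef, hnz⟩ => hn ⟨(before_succ a b l c).mpr (Or.inl hbef), hnz⟩)
          · -- all groups are singletons
            intro g hg
            rcases List.mem_append.mp hg with h | h
            · exact hGood.1 g h
            · rw [List.mem_singleton.mp h]; rfl
          · -- nonemptiness ↔ a tile before (l, c+1)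
            constructor
            · intro _
              exact ⟨l, c, (before_succ l c l c).mpr (Or.inr ⟨rfl, rfl⟩), hl, hc, hNZ⟩
            · intro _
              simp

-- moving from the end of row l to the start of row l+1 names the same set of scanned cells
theorem before_shift (i j l rl : Nat) (hj : i = l → j < rl) :
    Before i j l rl ↔ Before i j (l+1) 0 := by
  by_cases h : i = l
  · subst h; unfold Before; constructor
    · intro _; omega
    · intro _; exact Or.inr ⟨rfl, hj rfl⟩
  · unfold Before; omega

theorem badbefore_shift (M : List (List Int)) (l : Nat) :
    BadBefore M l (rlen M l) ↔ BadBefore M (l+1) 0 := by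
  unfold BadBefore
  constructor <;> rintro ⟨a, b, h1, h2, h3, h4⟩
  · exact ⟨a, b, (before_shift a b l (rlen M l) (fun ha => ha ▸ h3)).mp h1, h2, h3, h4⟩
  · exact ⟨a, b, (before_shift a b l (rlen M l) (fun ha => ha ▸ h3)).mpr h1, h2, h3, h4⟩

theorem hasbefore_shift (M : List (List Int)) (l : Nat) :
    HasBefore M l (rlen M l) ↔ HasBefore M (l+1) 0 := by
  unfold HasBefore
  constructor <;> rintro ⟨a, b, h1, h2, h3, h4⟩
  · exact ⟨a, b, (before_shift a b l (rlen M l) (fun ha => ha ▸ h3)).mp h1, h2, h3, h4⟩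
  · exact ⟨a, b, (before_shift a b l (rlen M l) (fun ha => ha ▸ h3)).mpr h1, h2, h3, h4⟩

theorem invA_shift (M : List (List Int)) (l : Nat)
    (s : List (List Int) × List (List (Nat × Nat))) (h : InvA M l (rlen M l) s) :
    InvA M (l+1) 0 s := by
  obtain ⟨hsh, hbad, hgood⟩ := h
  refine ⟨hsh, fun hb => hbad ((badbefore_shift M l).mpr hb), fun hnb => ?_⟩
  obtain ⟨hm, hg⟩ := hgood (fun hb => hnb ((badbefore_shift M l).mp hb))
  refine ⟨?_, hg.1, hg.2.trans (hasbefore_shift M l)⟩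
  intro a b ha hb
  obtain ⟨hm1, hm2⟩ := hm a b ha hb
  have hiff := before_shift a b l (rlen M l) (fun hax => hax ▸ hb)
  constructor
  · rintro ⟨hbef, hnz⟩; exact hm1 ⟨hiff.mpr hbef, hnz⟩
  · intro hn; exact hm2 (fun ⟨hbef, hnz⟩ => hn ⟨hiff.mp hbef, hnz⟩)

-- outer loop invariant
theorem bfgRows_inv (M : List (List Int)) (hPre : Pre_isImpossible M) :
    ∀ rem l m res, l + rem = M.length → InvA M l 0 (m, res) →
    InvA M M.length 0 (bfgRows m l rem res) := by
  intro rem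
  induction rem with
  | zero =>
    intro l m res hsum hInv
    have : l = M.length := by omega
    subst this
    exact hInv
  | succ rem ih =>
    intro l m res hsum hInv
    have hl : l < M.length := by omega
    simp only [bfgRows]
    rw [show rlen m l = rlen M l from hInv.1.2 l]
    have h2 := bfgCols_inv M hPre l hl (rlen M l) 0 m res (by omega) hInv
    have h3 := invA_shift M l _ h2
    exact ih (l+1) _ _ (by omega) h3

theorem badbefore_end (M : List (List Int)) :
    BadBefore M M.length 0 ↔ Bad M := by
  unfold BadBefore Bad
  constructor
  · rintro ⟨a, b, h1, h2, h3, h4⟩; exact ⟨a, h2, b, h3, h4⟩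
  · rintro ⟨a, h2, b, h3, h4⟩; exact ⟨a, b, Or.inl h2, h2, h3, h4⟩

theorem hasbefore_end (M : List (List Int)) :
    HasBefore M M.length 0 ↔ HasCell M := by
  unfold HasBefore HasCell
  constructor
  · rintro ⟨a, b, h1, h2, h3, h4⟩; exact ⟨a, h2, b, h3, h4⟩
  · rintro ⟨a, h2, b, h3, h4⟩; exact ⟨a, b, Or.inl h2, h2, h3, h4⟩

theorem invA_init (M : List (List Int)) : InvA M 0 0 (M, []) := by
  have hnb : ∀ i j, ¬ Before i j 0 0 := by intro i j; unfold Before; omega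
  refine ⟨⟨rfl, fun _ => rfl⟩, ?_, fun _ => ⟨?_, ?_, ?_⟩⟩
  · rintro ⟨a, b, h1, -⟩; exact absurd h1 (hnb a b)
  · intro a b ha hb
    exact ⟨fun ⟨h1, _⟩ => absurd h1 (hnb a b), fun _ => rfl⟩
  · intro g hg; simp at hg
  · constructor
    · intro h; exact absurd rfl h
    · rintro ⟨a, b, h1, -⟩; exact absurd h1 (hnb a b)

-- A computes "has a tile and no equal adjacent pair"
theorem A_char (M : List (List Int)) (hPre : Pre_isImpossible M) :
    (isImpossible M = true) ↔ (HasCell M ∧ ¬ Bad M) := by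
  have hfin := bfgRows_inv M hPre M.length 0 M [] (by omega) (invA_init M)
  unfold isImpossible board_find_groups
  obtain ⟨-, hBadC, hGoodC⟩ := hfin
  by_cases hBad : Bad M
  · obtain ⟨g, hg, hg2⟩ := hBadC ((badbefore_end M).mpr hBad)
    have hne : (bfgRows M 0 M.length []).2 ≠ [] := by
      intro h; rw [h] at hg; simp at hg
    rw [if_neg (by simpa [List.length_eq_zero_iff] using hne)]
    constructor
    · intro htrue
      rw [List.all_eq_true] at htrue
      have := htrue g hg
      simp at this
      omega
    · rintro ⟨-, hnb⟩; exact absurd hBad hnb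
  · obtain ⟨-, hGood⟩ := hGoodC (fun hb => hBad ((badbefore_end M).mp hb))
    by_cases hHas : HasCell M
    · have hne : (bfgRows M 0 M.length []).2 ≠ [] :=
        hGood.2.mpr ((hasbefore_end M).mpr hHas)
      rw [if_neg (by simpa [List.length_eq_zero_iff] using hne)]
      constructor
      · intro _; exact ⟨hHas, hBad⟩
      · intro _
        rw [List.all_eq_true]
        intro g hg
        simpa using hGood.1 g hg
    · have hemp : (bfgRows M 0 M.length []).2 = [] := by
        by_contra hne
        exact hHas ((hasbefore_end M).mp (hGood.2.mp hne))
      rw [hemp]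
      simp only [List.length_nil, if_true]
      constructor
      · intro h; exact absurd h (by simp)
      · rintro ⟨h, -⟩; exact absurd h hHas

theorem getD0_eq_cellv (M : List (List Int)) (i j : Nat) (hj : j < rlen M i) :
    (M.getD i []).getD j 0 = cellv M i j := by
  unfold cellv
  rw [List.getD_eq_getElem _ _ hj, List.getD_eq_getElem _ _ hj]

-- B computes the same predicate (no precondition needed)
theorem B_char (M : List (List Int)) :
    (isImpossible_alt M = true) ↔ (HasCell M ∧ ¬ Bad M) := by
  unfold isImpossible_alt
  simp only [Bool.and_eq_true, Bool.not_eq_eq_eq_not, Bool.not_true, List.any_eq_false,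
    List.any_eq_true, List.mem_range, Bool.or_eq_true, bne_iff_ne, beq_iff_eq,
    decide_eq_true_eq, not_exists, not_and, not_or]
  constructor
  · rintro ⟨⟨i, hi, j, hj, h0, h1⟩, hP⟩
    refine ⟨⟨i, hi, j, hj, ?_, ?_⟩, ?_⟩
    · rw [← getD0_eq_cellv M i j hj]; exact h0
    · rw [← getD0_eq_cellv M i j hj]; exact h1
    · rintro ⟨a, ha, b, hb, ⟨g0, g1⟩, hdisj⟩
      obtain ⟨hA, hB2⟩ := hP a ha b hb
        ⟨by rw [getD0_eq_cellv M a b hb]; exact g0, by rw [getD0_eq_cellv M a b hb]; exact g1⟩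
      rcases hdisj with ⟨d1, d2⟩ | ⟨d1, d2, d3⟩
      · exact hA d1 (by rw [getD0_eq_cellv M a (b+1) d1, getD0_eq_cellv M a b hb]; exact d2)
      · exact hB2 ⟨d1, d2⟩
          (by rw [getD0_eq_cellv M (a+1) b d2, getD0_eq_cellv M a b hb]; exact d3)
  · rintro ⟨⟨i, hi, j, hj, h0, h1⟩, hNB⟩
    constructor
    · exact ⟨i, hi, j, hj, by rw [getD0_eq_cellv M i j hj]; exact h0,
        by rw [getD0_eq_cellv M i j hj]; exact h1⟩
    · rintro a ha b hb ⟨g0, g1⟩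
      have gnz : NZ M a b := ⟨by rw [← getD0_eq_cellv M a b hb]; exact g0,
        by rw [← getD0_eq_cellv M a b hb]; exact g1⟩
      constructor
      · intro hlt heq
        exact hNB ⟨a, ha, b, hb, gnz, Or.inl ⟨hlt,
          by rw [← getD0_eq_cellv M a (b+1) hlt, ← getD0_eq_cellv M a b hb]; exact heq⟩⟩
      · rintro ⟨hlt, hbl⟩ heq
        exact hNB ⟨a, ha, b, hb, gnz, Or.inr ⟨hlt, hbl,
          by rw [← getD0_eq_cellv M (a+1) b hbl, ← getD0_eq_cellv M a b hb]; exact heq⟩⟩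

-- ===== VERDICT (by name: the statement is the Claim_ definition above) =====
theorem isImpossible_spec : Claim_equal_isImpossible := by
  intro M _ hPre
  unfold Spec_isImpossible
  have := (A_char M hPre).trans (B_char M).symm
  exact Bool.eq_iff_iff.mpr this
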